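-- pv_equiv track=rewrite | github.com/dptreurniet/advent-of-code | year_2015/day21.py | player_wins
-- ===== SOURCE A (Python) =====
-- def player_wins(stats, boss_hp, boss_damage, boss_armor):
--     bhp = boss_hp
--     bd = boss_damage
--     ba = boss_armor
--
--     php = 100
--     pd = stats[1]
--     pa = stats[2]
--
--     player_turn = True
--     while php > 0 and bhp > 0:
--         if player_turn:
--             bhp -= (pd - ba)
--         else:
--             php -= (bd - pa)
--         player_turn = not player_turn
--     return bhp <= 0
-- ===== SOURCE B (Python) =====
-- def player_wins(stats, boss_hp, boss_damage, boss_armor):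
--     dp = stats[1] - boss_armor       # player damage per hit
--     db = boss_damage - stats[2]      # boss damage per hit
--     if boss_hp <= 0:
--         return True
--     if dp <= 0:
--         return False
--     if db <= 0:
--         return True
--     # player attacks first: player wins iff it kills in no more rounds than the boss needs
--     return -(-boss_hp // dp) <= -(-100 // db)
-- ===== Notes on version B (the rewrite author's own statement) =====
-- stated objective: simpler
-- what changed: B replaces A's hit-by-hit while-loop combat simulation with a closed form: per-turn damages, ceiling-division turn counts for each side, and one comparison encoding the player-moves-first tie-break.
import Mathlib
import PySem

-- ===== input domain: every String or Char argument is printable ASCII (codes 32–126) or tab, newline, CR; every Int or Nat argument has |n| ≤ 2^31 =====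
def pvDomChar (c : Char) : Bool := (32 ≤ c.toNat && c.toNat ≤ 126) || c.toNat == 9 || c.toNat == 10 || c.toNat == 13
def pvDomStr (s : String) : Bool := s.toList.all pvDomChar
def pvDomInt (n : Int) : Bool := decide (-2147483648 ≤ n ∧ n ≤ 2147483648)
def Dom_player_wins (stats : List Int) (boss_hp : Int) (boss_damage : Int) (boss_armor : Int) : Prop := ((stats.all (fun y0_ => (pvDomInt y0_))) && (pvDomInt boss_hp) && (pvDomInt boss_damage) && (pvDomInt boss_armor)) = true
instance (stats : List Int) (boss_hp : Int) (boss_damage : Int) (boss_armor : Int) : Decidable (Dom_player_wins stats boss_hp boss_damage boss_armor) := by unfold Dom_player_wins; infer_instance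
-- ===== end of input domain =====

-- B replaces A's hit-by-hit combat simulation with a closed form: ceiling-division turn counts per side, compared with the player-moves-first tie-break (simpler).

-- ===== PORT A =====
-- A's while-loop, one half-turn per step; the fuel only makes the recursion total in Lean:
-- under Pre_ it is large enough that it is never exhausted (proved below), so this is A's loop step for step.
def pwLoop (dp db : Int) : Nat → Bool → Int → Int → Bool
  | 0, _, _, bhp => decide (bhp ≤ 0)
  | n+1, player_turn, php, bhp =>
    if php > 0 ∧ bhp > 0 then
      if player_turn then pwLoop dp db n false php (bhp - dp)
      else pwLoop dp db n true (php - db) bhp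
    else decide (bhp ≤ 0)

def player_wins (stats : List Int) (boss_hp : Int) (boss_damage : Int) (boss_armor : Int) : Bool :=
  -- stats[1], stats[2]: IndexError when stats has < 3 elements, excluded by Pre_
  let pd := (PySem.List.pyGet? stats 1).getD 0
  let pa := (PySem.List.pyGet? stats 2).getD 0
  pwLoop (pd - boss_armor) (boss_damage - pa) (2 * (boss_hp.toNat + 100) + 4) true 100 boss_hp

-- ===== PORT B =====
def player_wins_alt (stats : List Int) (boss_hp : Int) (boss_damage : Int) (boss_armor : Int) : Bool :=
  let dp := (PySem.List.pyGet? stats 1).getD 0 - boss_armor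
  let db := boss_damage - (PySem.List.pyGet? stats 2).getD 0
  if boss_hp ≤ 0 then true
  else if dp ≤ 0 then false
  else if db ≤ 0 then true
  else decide (-(PySem.Int.floordiv (-boss_hp) dp) ≤ -(PySem.Int.floordiv (-(100:Int)) db))

-- ===== PRECONDITION & SPEC =====
-- Pre_ excludes (a) stats with fewer than 3 elements, where A raises IndexError, and
-- (b) inputs where the boss starts alive but neither side can deal positive damage, where A's while-loop never terminates.
def Pre_player_wins (stats : List Int) (boss_hp : Int) (boss_damage : Int) (boss_armor : Int) : Prop :=
  3 ≤ stats.length ∧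
  (boss_hp ≤ 0 ∨ boss_armor < stats.getD 1 0 ∨ stats.getD 2 0 < boss_damage)
instance (stats : List Int) (boss_hp : Int) (boss_damage : Int) (boss_armor : Int) : Decidable (Pre_player_wins stats boss_hp boss_damage boss_armor) := by unfold Pre_player_wins; infer_instance

def pvWitness_player_wins : List Int × Int × Int × Int := ([8, 7, 3], 50, 9, 2)

def Spec_player_wins (stats : List Int) (boss_hp : Int) (boss_damage : Int) (boss_armor : Int) (out : Bool) : Prop := out = player_wins_alt stats boss_hp boss_damage boss_armor
instance (stats : List Int) (boss_hp : Int) (boss_damage : Int) (boss_armor : Int) (out : Bool) : Decidable (Spec_player_wins stats boss_hp boss_damage boss_armor out) := by unfold Spec_player_wins; infer_instance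

-- ===== CLAIM (what is proved, stated in full; the proofs are below) =====
def Claim_equal_player_wins : Prop := ∀ (stats : List Int) (boss_hp : Int) (boss_damage : Int) (boss_armor : Int), Dom_player_wins stats boss_hp boss_damage boss_armor → Pre_player_wins stats boss_hp boss_damage boss_armor → Spec_player_wins stats boss_hp boss_damage boss_armor (player_wins stats boss_hp boss_damage boss_armor)

-- ===== LEMMAS AND PROOFS =====

-- ceiling division -((-a) // b), b > 0: bracket characterisation
theorem pv_cd_le {a b t : Int} (hb : 0 < b) :
    (-(PySem.Int.floordiv (-a) b) ≤ t ↔ a ≤ t * b) := by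
  constructor
  · intro h
    have := (PySem.Int.neg_floordiv_neg_eq_iff_of_pos hb (a := a)
      (q := -(PySem.Int.floordiv (-a) b))).mp rfl
    nlinarith [this.1, this.2]
  · intro h
    by_contra hc
    push Not at hc
    have := (PySem.Int.neg_floordiv_neg_eq_iff_of_pos hb (a := a)
      (q := -(PySem.Int.floordiv (-a) b))).mp rfl
    nlinarith [this.1, this.2]

theorem pv_le_cd {a b t : Int} (hb : 0 < b) :
    (t ≤ -(PySem.Int.floordiv (-a) b) ↔ (t - 1) * b < a) := by
  constructor
  · intro h
    have := (PySem.Int.neg_floordiv_neg_eq_iff_of_pos hb (a := a)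
      (q := -(PySem.Int.floordiv (-a) b))).mp rfl
    nlinarith [this.1, this.2]
  · intro h
    by_contra hc
    push Not at hc
    have := (PySem.Int.neg_floordiv_neg_eq_iff_of_pos hb (a := a)
      (q := -(PySem.Int.floordiv (-a) b))).mp rfl
    nlinarith [this.1, this.2]

-- shift: ceil((a-b)/b) = ceil(a/b) - 1
theorem pv_cd_shift (a b : Int) (hb : 0 < b) :
    -(PySem.Int.floordiv (-(a - b)) b) = -(PySem.Int.floordiv (-a) b) - 1 := by
  rw [PySem.Int.neg_floordiv_neg_eq_iff_of_pos hb]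
  have := (PySem.Int.neg_floordiv_neg_eq_iff_of_pos hb (a := a)
    (q := -(PySem.Int.floordiv (-a) b))).mp rfl
  constructor <;> nlinarith [this.1, this.2]

-- main loop lemma, both damages positive: result = (turns to kill boss ≤ turns to kill player)
theorem pwLoop_pos (dp db : Int) (hdp : 0 < dp) (hdb : 0 < db) :
    ∀ (fuel : Nat) (php bhp : Int), 0 < php → 0 < bhp → 2 * bhp.toNat ≤ fuel →
    pwLoop dp db fuel true php bhp =
      decide (-(PySem.Int.floordiv (-bhp) dp) ≤ -(PySem.Int.floordiv (-php) db)) := by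
  intro fuel
  induction fuel using Nat.strong_induction_on with
  | _ fuel ih =>
    intro php bhp hphp hbhp hfuel
    have hfe : ∃ n, fuel = n + 2 := ⟨fuel - 2, by omega⟩
    obtain ⟨n, rfl⟩ := hfe
    rw [pwLoop, if_pos ⟨hphp, hbhp⟩, if_pos rfl]
    by_cases hkill : bhp - dp ≤ 0
    · rw [pwLoop, if_neg (by omega), decide_eq_true (by omega)]
      have h1 : -(PySem.Int.floordiv (-bhp) dp) ≤ 1 := (pv_cd_le hdp).mpr (by omega)
      have h2 : (1:Int) ≤ -(PySem.Int.floordiv (-php) db) := (pv_le_cd hdb).mpr (by nlinarith)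
      simp; omega
    · rw [pwLoop, if_pos ⟨hphp, by omega⟩, if_neg (by simp)]
      by_cases hpk : php - db ≤ 0
      · have hne : ∃ m, n = m + 1 := ⟨n - 1, by omega⟩
        obtain ⟨m, rfl⟩ := hne
        rw [pwLoop, if_neg (by omega), decide_eq_false (by omega)]
        have h1 : -(PySem.Int.floordiv (-php) db) ≤ 1 := (pv_cd_le hdb).mpr (by omega)
        have h2 : (2:Int) ≤ -(PySem.Int.floordiv (-bhp) dp) := (pv_le_cd hdp).mpr (by nlinarith)
        simp; omega
      · have hrec := ih n (by omega) (php - db) (bhp - dp) (by omega) (by omega) (by omega)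
        rw [hrec]
        have e1 := pv_cd_shift bhp dp hdp
        have e2 := pv_cd_shift php db hdb
        simp only [e1, e2]
        simp

-- player damage nonpositive, boss damage positive: boss survives, player eventually dies → false
theorem pwLoop_np (dp db : Int) (hdp : dp ≤ 0) (hdb : 0 < db) :
    ∀ (fuel : Nat) (php bhp : Int), 0 < php → 0 < bhp → 2 * php.toNat + 1 ≤ fuel →
    pwLoop dp db fuel true php bhp = false := by
  intro fuel
  induction fuel using Nat.strong_induction_on with
  | _ fuel ih =>
    intro php bhp hphp hbhp hfuel
    have hfe : ∃ n, fuel = n + 2 := ⟨fuel - 2, by omega⟩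
    obtain ⟨n, rfl⟩ := hfe
    rw [pwLoop, if_pos ⟨hphp, hbhp⟩, if_pos rfl]
    rw [pwLoop, if_pos ⟨hphp, by omega⟩, if_neg (by simp)]
    by_cases hpk : php - db ≤ 0
    · have hne : ∃ m, n = m + 1 := ⟨n - 1, by omega⟩
      obtain ⟨m, rfl⟩ := hne
      rw [pwLoop, if_neg (by omega), decide_eq_false (by omega)]
    · exact ih n (by omega) (php - db) (bhp - dp) (by omega) (by omega) (by omega)

-- player damage positive, boss damage nonpositive: player never dies, boss does → true
theorem pwLoop_pn (dp db : Int) (hdp : 0 < dp) (hdb : db ≤ 0) :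
    ∀ (fuel : Nat) (php bhp : Int), 0 < php → 0 < bhp → 2 * bhp.toNat ≤ fuel →
    pwLoop dp db fuel true php bhp = true := by
  intro fuel
  induction fuel using Nat.strong_induction_on with
  | _ fuel ih =>
    intro php bhp hphp hbhp hfuel
    have hfe : ∃ n, fuel = n + 2 := ⟨fuel - 2, by omega⟩
    obtain ⟨n, rfl⟩ := hfe
    rw [pwLoop, if_pos ⟨hphp, hbhp⟩, if_pos rfl]
    by_cases hkill : bhp - dp ≤ 0
    · rw [pwLoop, if_neg (by omega), decide_eq_true (by omega)]
    · rw [pwLoop, if_pos ⟨hphp, by omega⟩, if_neg (by simp)]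
      exact ih n (by omega) (php - db) (bhp - dp) (by omega) (by omega) (by omega)

-- ===== VERDICT (by name: the statement is the Claim_ definition above) =====
theorem player_wins_spec : Claim_equal_player_wins := by
  intro stats boss_hp boss_damage boss_armor _ hpre
  obtain ⟨hlen, hterm⟩ := hpre
  unfold Spec_player_wins player_wins player_wins_alt
  have h1 : PySem.List.pyGet? stats 1 = some (stats.getD 1 0) := by
    rw [show (1:Int) = ((1:Nat):Int) by norm_num, PySem.List.pyGet?_natCast]
    simp [List.getD, List.getElem?_eq_getElem (by omega : 1 < stats.length)]
  have h2 : PySem.List.pyGet? stats 2 = some (stats.getD 2 0) := by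
    rw [show (2:Int) = ((2:Nat):Int) by norm_num, PySem.List.pyGet?_natCast]
    simp [List.getD, List.getElem?_eq_getElem (by omega : 2 < stats.length)]
  rw [h1, h2]
  simp only [Option.getD_some]
  set dp := stats.getD 1 0 - boss_armor with hdp
  set db := boss_damage - stats.getD 2 0 with hdb
  by_cases hb0 : boss_hp ≤ 0
  · rw [if_pos hb0]
    rw [pwLoop, if_neg (by omega), decide_eq_true (by omega)]
  · rw [if_neg hb0]
    by_cases hdpp : dp ≤ 0
    · rw [if_pos hdpp]
      have hdbp : 0 < db := by omega
      exact pwLoop_np dp db hdpp hdbp _ 100 boss_hp (by omega) (by omega) (by omega)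
    · rw [if_neg hdpp]
      by_cases hdbp : db ≤ 0
      · rw [if_pos hdbp]
        exact pwLoop_pn dp db (by omega) hdbp _ 100 boss_hp (by omega) (by omega) (by omega)
      · rw [if_neg hdbp]
        exact pwLoop_pos dp db (by omega) (by omega) _ 100 boss_hp (by omega) (by omega) (by omega)
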